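-- pv_equiv track=rewrite | github.com/trotsky1997/CodeMem | trash/conversation_rank.py | _detect_solution_pattern
-- ===== SOURCE A (Python) =====
-- from typing import List, Dict, Any, Set
--
-- def _detect_solution_pattern(session: List[Dict]) -> bool:
--     """
--     Detect if session has complete problem-solution pattern.
--
--     Pattern:
--     1. User asks question (with problem keywords)
--     2. Assistant provides detailed answer (code or long explanation)
--     3. User confirms or follows up (indicates helpfulness)
--     """
--     if len(session) < 3:
--         return False
--
--     # Check for problem keywords
--     problem_keywords = [
--         '如何', '怎么', '为什么', '错误', 'error', 'how', 'why', 'issue',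
--         'problem', '问题', 'bug', 'help', '帮助'
--     ]
--
--     has_question = any(
--         any(kw in msg.get('text', '').lower() for kw in problem_keywords)
--         for msg in session if msg.get('role') == 'user'
--     )
--
--     # Check for code blocks or detailed answers
--     has_code = any('```' in msg.get('text', '') for msg in session if msg.get('role') == 'assistant')
--     has_detailed_answer = any(
--         len(msg.get('text', '')) > 200
--         for msg in session if msg.get('role') == 'assistant'
--     )
--
--     # Check for user confirmation
--     confirmation_keywords = [
--         '谢谢', '明白', '懂了', 'thanks', 'got it', 'works', 'solved',
--         '解决', '成功', 'success'
--     ]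
--
--     has_confirmation = any(
--         any(kw in msg.get('text', '').lower() for kw in confirmation_keywords)
--         for msg in session if msg.get('role') == 'user'
--     )
--
--     return has_question and (has_code or has_detailed_answer) and has_confirmation
-- ===== SOURCE B (Python) =====
-- def _detect_solution_pattern(session) -> bool:
--     # Different strategy: concatenate the per-role texts once (joined with '\n',
--     # which occurs in no keyword), then run each substring test on the single blob.
--     if len(session) < 3:
--         return False
--
--     problem_keywords = [
--         '如何', '怎么', '为什么', '错误', 'error', 'how', 'why', 'issue',
--         'problem', '问题', 'bug', 'help', '帮助'
--     ]
--     confirmation_keywords = [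
--         '谢谢', '明白', '懂了', 'thanks', 'got it', 'works', 'solved',
--         '解决', '成功', 'success'
--     ]
--
--     user_blob = '\n'.join(
--         msg.get('text', '').lower() for msg in session if msg.get('role') == 'user'
--     )
--     assistant_texts = [
--         msg.get('text', '') for msg in session if msg.get('role') == 'assistant'
--     ]
--     assistant_blob = '\n'.join(assistant_texts)
--
--     has_question = any(kw in user_blob for kw in problem_keywords)
--     has_code = '```' in assistant_blob
--     has_detailed_answer = max((len(t) for t in assistant_texts), default=0) > 200
--     has_confirmation = any(kw in user_blob for kw in confirmation_keywords)
--
--     return has_question and (has_code or has_detailed_answer) and has_confirmation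
-- ===== Notes on version B (the rewrite author's own statement) =====
-- stated objective: alternative
-- what changed: Instead of scanning messages with nested any(...) per keyword, B joins each role's texts once into a single '\n'-separated blob (the separator occurs in no keyword) and runs each substring test on the blob, replacing the detailed-answer scan with a max over assistant text lengths.
import Mathlib
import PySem

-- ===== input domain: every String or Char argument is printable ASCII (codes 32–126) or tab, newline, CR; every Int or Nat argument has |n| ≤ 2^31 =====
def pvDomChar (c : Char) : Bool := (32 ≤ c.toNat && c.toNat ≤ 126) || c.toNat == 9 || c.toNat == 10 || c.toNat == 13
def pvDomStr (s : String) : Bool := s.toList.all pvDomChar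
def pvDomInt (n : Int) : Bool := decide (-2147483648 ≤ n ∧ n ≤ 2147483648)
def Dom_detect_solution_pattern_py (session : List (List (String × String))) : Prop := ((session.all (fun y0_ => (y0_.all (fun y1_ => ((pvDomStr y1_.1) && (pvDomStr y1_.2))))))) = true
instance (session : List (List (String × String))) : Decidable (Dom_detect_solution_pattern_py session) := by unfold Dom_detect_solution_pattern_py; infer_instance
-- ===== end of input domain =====

-- B replaces A's per-message nested any(...) keyword scans by joining each role's texts once
-- into a single '\n'-separated blob (no keyword contains '\n') and testing substrings on the
-- blob, and replaces the detailed-answer scan by a max over assistant text lengths (alternative).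

-- shared accessors: msg.get('text', '') and msg.get('role')  (dict = assoc list, first match)
def pvText (msg : List (String × String)) : String := (PySem.Dict.mk msg).getD "text" ""
def pvRole (msg : List (String × String)) : Option String := (PySem.Dict.mk msg).get? "role"

def pvProblemKeywords : List String :=
  ["如何", "怎么", "为什么", "错误", "error", "how", "why", "issue",
   "problem", "问题", "bug", "help", "帮助"]

def pvConfirmationKeywords : List String :=
  ["谢谢", "明白", "懂了", "thanks", "got it", "works", "solved",
   "解决", "成功", "success"]

-- ===== PORT A =====
def detect_solution_pattern_py (session : List (List (String × String))) : Bool :=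
  if session.length < 3 then false
  else
    let has_question :=
      (session.filter (fun msg => pvRole msg == some "user")).any
        (fun msg => pvProblemKeywords.any
          (fun kw => PySem.Str.isIn kw (PySem.Str.lower (pvText msg))))
    let has_code :=
      (session.filter (fun msg => pvRole msg == some "assistant")).any
        (fun msg => PySem.Str.isIn "```" (pvText msg))
    let has_detailed_answer :=
      (session.filter (fun msg => pvRole msg == some "assistant")).any
        (fun msg => decide (200 < PySem.Str.len (pvText msg)))
    let has_confirmation :=
      (session.filter (fun msg => pvRole msg == some "user")).any
        (fun msg => pvConfirmationKeywords.any
          (fun kw => PySem.Str.isIn kw (PySem.Str.lower (pvText msg))))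
    has_question && (has_code || has_detailed_answer) && has_confirmation

-- ===== PORT B =====
def detect_solution_pattern_py_alt (session : List (List (String × String))) : Bool :=
  if session.length < 3 then false
  else
    let user_blob :=
      PySem.Str.join "\n"
        ((session.filter (fun msg => pvRole msg == some "user")).map
          (fun msg => PySem.Str.lower (pvText msg)))
    let assistant_texts :=
      (session.filter (fun msg => pvRole msg == some "assistant")).map pvText
    let assistant_blob := PySem.Str.join "\n" assistant_texts
    let has_question := pvProblemKeywords.any (fun kw => PySem.Str.isIn kw user_blob)
    let has_code := PySem.Str.isIn "```" assistant_blob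
    let has_detailed_answer :=
      decide (200 < PySem.List.maxD (assistant_texts.map PySem.Str.len) (fun y => y) 0)
    let has_confirmation := pvConfirmationKeywords.any (fun kw => PySem.Str.isIn kw user_blob)
    has_question && (has_code || has_detailed_answer) && has_confirmation

-- ===== PRECONDITION & SPEC =====
def Spec_detect_solution_pattern_py (session : List (List (String × String))) (out : Bool) : Prop := out = detect_solution_pattern_py_alt session
instance (session : List (List (String × String))) (out : Bool) : Decidable (Spec_detect_solution_pattern_py session out) := by unfold Spec_detect_solution_pattern_py; infer_instance

-- ===== CLAIM =====
def Claim_equal_detect_solution_pattern_py : Prop := ∀ (session : List (List (String × String))), Dom_detect_solution_pattern_py session → Spec_detect_solution_pattern_py session (detect_solution_pattern_py session)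

-- ===== LEMMAS AND PROOFS =====

-- an infix avoiding the separator lies entirely on one side of it
lemma infix_append_cons_iff {α : Type} (sub a b : List α) (c : α)
    (hne : sub ≠ []) (hc : c ∉ sub) :
    sub <:+: (a ++ c :: b) ↔ (sub <:+: a ∨ sub <:+: b) := by
  induction a with
  | nil =>
    simp only [List.nil_append, List.infix_cons_iff]
    constructor
    · rintro (hp | hi)
      · exfalso
        cases sub with
        | nil => exact hne rfl
        | cons s ss =>
          rcases (List.cons_prefix_cons.mp hp) with ⟨hsc, _⟩
          exact hc (hsc ▸ List.mem_cons_self)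
      · exact Or.inr hi
    · rintro (ha | hb)
      · exact absurd (List.eq_nil_of_infix_nil ha) hne
      · exact Or.inr hb
  | cons x a' ih =>
    rw [List.cons_append, List.infix_cons_iff, ih]
    constructor
    · rintro (hp | h)
      · left
        -- sub <+: (x :: a') ++ c :: b and c ∉ sub force sub <+: x :: a'
        have hlen : sub.length ≤ (x :: a').length := by
          by_contra hgt
          push Not at hgt
          obtain ⟨t, ht⟩ := hp
          have hmem : c ∈ sub := by
            have h1 : (sub ++ t)[(x :: a').length]? = some c := by
              rw [← List.cons_append] at ht
              rw [ht, List.getElem?_append_right (by omega)]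
              simp
            rw [List.getElem?_append_left hgt] at h1
            exact List.mem_of_getElem? h1
          exact hc hmem
        have hpre : sub <+: x :: a' := by
          rw [← List.cons_append] at hp
          exact List.prefix_of_prefix_length_le hp (List.prefix_append _ _) hlen
        exact hpre.isInfix
      · rcases h with h | h
        · exact Or.inl (List.infix_cons h)
        · exact Or.inr h
    · rintro (h | hb)
      · rcases List.infix_cons_iff.mp h with hp | hi
        · left
          rw [← List.cons_append]
          exact hp.trans (List.prefix_append _ _)
        · exact Or.inr (Or.inl hi)
      · exact Or.inr (Or.inr hb)

-- 'kw in "\n".join(parts)' tests each part when kw is nonempty and newline-free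
lemma isIn_join_chars (kw : List Char) (hne : kw ≠ []) (hc : '\n' ∉ kw)
    (parts : List (List Char)) :
    PySem.Chars.isIn kw (PySem.Chars.join ['\n'] parts)
      = parts.any (fun p => PySem.Chars.isIn kw p) := by
  induction parts with
  | nil =>
    rw [PySem.Chars.join_nil]
    simp [PySem.Chars.isIn_eq_false_iff, List.infix_nil, hne]
  | cons p rest ih =>
    cases rest with
    | nil => rw [PySem.Chars.join_singleton]; simp
    | cons q rest' =>
      rw [PySem.Chars.join_cons_cons, Bool.eq_iff_iff]
      have heq : p ++ ['\n'] ++ PySem.Chars.join ['\n'] (q :: rest')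
          = p ++ '\n' :: PySem.Chars.join ['\n'] (q :: rest') := by simp
      rw [heq, PySem.Chars.isIn_iff_infix,
          infix_append_cons_iff kw p _ '\n' hne hc,
          ← PySem.Chars.isIn_iff_infix, ← PySem.Chars.isIn_iff_infix, ih]
      simp

-- same at the String level
lemma isIn_join_str (kw : String) (hne : kw.toList ≠ []) (hc : '\n' ∉ kw.toList)
    (texts : List String) :
    PySem.Str.isIn kw (PySem.Str.join "\n" texts)
      = texts.any (fun t => PySem.Str.isIn kw t) := by
  rw [PySem.Str.isIn_eq, PySem.Str.toList_join]
  have hsep : "\n".toList = ['\n'] := rfl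
  rw [hsep, isIn_join_chars kw.toList hne hc]
  rw [List.any_map]
  rfl

-- scanning keywords against the joined blob = scanning messages with the keyword list
lemma any_isIn_join (ks : List String)
    (hks : ∀ kw ∈ ks, kw.toList ≠ [] ∧ '\n' ∉ kw.toList) (texts : List String) :
    ks.any (fun kw => PySem.Str.isIn kw (PySem.Str.join "\n" texts))
      = texts.any (fun t => ks.any (fun kw => PySem.Str.isIn kw t)) := by
  rw [Bool.eq_iff_iff]
  simp only [List.any_eq_true]
  constructor
  · rintro ⟨kw, hkw, hin⟩
    rw [isIn_join_str kw (hks kw hkw).1 (hks kw hkw).2 texts] at hin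
    rcases List.any_eq_true.mp hin with ⟨t, ht, hin'⟩
    exact ⟨t, ht, kw, hkw, hin'⟩
  · rintro ⟨t, ht, kw, hkw, hin⟩
    refine ⟨kw, hkw, ?_⟩
    rw [isIn_join_str kw (hks kw hkw).1 (hks kw hkw).2 texts]
    exact List.any_eq_true.mpr ⟨t, ht, hin⟩

-- 'max(lengths, default=0) > 200' = 'some length > 200'
lemma maxD_gt_iff (xs : List Int) :
    decide (200 < PySem.List.maxD xs (fun y => y) 0)
      = xs.any (fun v => decide (200 < v)) := by
  cases xs with
  | nil => decide
  | cons x t =>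
    rw [Bool.eq_iff_iff]
    have hne : (x :: t) ≠ ([] : List Int) := by simp
    have hmem := PySem.List.maxD_mem (x :: t) (fun y => y) 0 hne
    have hmax := PySem.List.max?_eq_some_maxD (x :: t) (fun y => y) 0 hne
    have hle := PySem.List.max?_id_le hmax
    simp only [decide_eq_true_eq, List.any_eq_true]
    constructor
    · intro h
      exact ⟨PySem.List.maxD (x :: t) (fun y => y) 0, hmem, by simpa using h⟩
    · rintro ⟨v, hv, h⟩
      have := hle v hv
      omega

-- ===== VERDICT (by name: the statement is the Claim_ definition above) =====
theorem detect_solution_pattern_py_spec : Claim_equal_detect_solution_pattern_py := by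
  intro session _
  unfold Spec_detect_solution_pattern_py detect_solution_pattern_py detect_solution_pattern_py_alt
  by_cases h : session.length < 3
  · simp [h]
  · simp only [if_neg h]
    rw [any_isIn_join pvProblemKeywords (by decide),
        any_isIn_join pvConfirmationKeywords (by decide),
        isIn_join_str "```" (by decide) (by decide),
        maxD_gt_iff]
    simp [List.any_map, Function.comp]
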